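-- pv_equiv track=rewrite | github.com/estoneman/tbsp | py/win_util.py | remove_tld
-- ===== SOURCE A (Python) =====
-- def remove_tld(d: str) -> str:
--     """Remove the TLD from a domain
--
--     Positional Arguments:
--     d -- domain to be stripped
--     """
--     d_len = len(d)
--
--     r = d_len - 1
--     sub_d = list(d)
--
--     try:
--         while d[r] != ".":
--             sub_d.pop()
--             r -= 1
--
--         sub_d.pop() # for that pesky period
--     except IndexError:
--         # input does not have '.' and len > 0, so return as is
--         return d.strip()
--
--     return "".join(sub_d)
-- ===== SOURCE B (Python) =====
-- def remove_tld(d: str) -> str: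
--     """Remove the TLD from a domain
--
--     Positional Arguments:
--     d -- domain to be stripped
--     """
--     if "." not in d:
--         return d.strip()
--     return ".".join(d.split(".")[:-1])
-- ===== Notes on version B (the rewrite author's own statement) =====
-- stated objective: idiomatic
-- what changed: Replaces the backward char-by-char scan that pops a list copy and relies on a caught IndexError with a dot-membership guard plus a split-on-dot/rejoin of all segments but the last.
import Mathlib
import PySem

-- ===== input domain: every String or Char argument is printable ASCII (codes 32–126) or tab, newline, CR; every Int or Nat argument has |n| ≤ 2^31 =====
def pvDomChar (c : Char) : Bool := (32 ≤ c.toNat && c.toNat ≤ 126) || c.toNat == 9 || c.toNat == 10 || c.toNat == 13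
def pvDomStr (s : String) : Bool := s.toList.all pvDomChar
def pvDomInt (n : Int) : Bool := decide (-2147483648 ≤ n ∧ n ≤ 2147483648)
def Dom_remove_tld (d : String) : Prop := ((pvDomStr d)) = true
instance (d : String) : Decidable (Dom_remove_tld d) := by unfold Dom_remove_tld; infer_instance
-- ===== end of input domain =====

-- B replaces A's backward char-by-char scan (popping a list copy, IndexError-driven) with a
-- membership guard plus split('.')/rejoin of all segments but the last (objective: idiomatic).

-- ===== PORT A =====
-- the try/while body: d[r] (IndexError → none), compare with '.', sub_d.pop(), r -= 1
def removeTldLoop (dcs : List Char) (sub : List Char) (r : Int) : Option (List Char) :=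
  match PySem.List.pyGet? dcs r with
  | none => none                                   -- d[r] raises IndexError
  | some c =>
    if c = '.' then some sub                       -- while condition false: exit loop
    else
      match h : PySem.List.pop? sub with
      | none => none                               -- sub_d.pop() raises IndexError
      | some pr => removeTldLoop dcs pr.2 (r - 1)
termination_by sub.length
decreasing_by
  have := PySem.List.length_of_pop?_eq_some sub h
  omega

def remove_tld (d : String) : String :=
  -- d_len = len(d); r = d_len - 1; sub_d = list(d); then the try block
  match removeTldLoop d.toList d.toList (PySem.Str.len d - 1) with
  | none => PySem.Str.strip d                      -- except IndexError: return d.strip()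
  | some sub =>
    match PySem.List.pop? sub with                 -- sub_d.pop()  # for that pesky period
    | none => PySem.Str.strip d                    -- (still inside the try)
    | some pr => String.ofList pr.2                -- "".join(sub_d): exact for a list of single chars

-- ===== PORT B =====
def remove_tld_alt (d : String) : String :=
  if PySem.Str.isIn "." d = false then PySem.Str.strip d
  else
    -- ".".join(d.split(".")[:-1])
    String.ofList (PySem.Chars.join ['.']
      (PySem.List.slice (PySem.Chars.splitOn d.toList ['.']) none (some (-1))))

-- ===== PRECONDITION & SPEC =====
def Spec_remove_tld (d : String) (out : String) : Prop := out = remove_tld_alt d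
instance (d : String) (out : String) : Decidable (Spec_remove_tld d out) := by unfold Spec_remove_tld; infer_instance

-- ===== CLAIM (what is proved, stated in full; the proofs are below) =====
def Claim_equal_remove_tld : Prop := ∀ (d : String), Dom_remove_tld d → Spec_remove_tld d (remove_tld d)

-- ===== LEMMAS AND PROOFS =====

-- PySem's fuel-based splitOn with the one-char separator "." is Lean's splitOnP
theorem modifyHead_fun_id {α : Type} (l : List α) : List.modifyHead (fun x => x) l = l := by
  cases l <;> simp

theorem splitOn_go_single (fuel : Nat) : ∀ (l cur : List Char) (acc : List (List Char)), l.length < fuel →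
    PySem.Chars.splitOn.go ['.'] fuel l cur acc
      = acc.reverse ++ List.modifyHead (cur.reverse ++ ·) (List.splitOnP (· == '.') l) := by
  induction fuel with
  | zero => intro l cur acc h; omega
  | succ n ih =>
    intro l cur acc h
    match l with
    | [] => simp [PySem.Chars.splitOn.go]
    | c :: rest =>
      by_cases hc : c = '.'
      · subst hc
        have hpre : List.isPrefixOf ['.'] ('.' :: rest) = true := by simp [List.isPrefixOf]
        simp only [PySem.Chars.splitOn.go, hpre, if_pos]
        rw [show List.drop ['.'].length ('.' :: rest) = rest by simp,
          ih rest [] (cur.reverse :: acc) (by simpa using Nat.lt_of_succ_lt_succ h)]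
        simp [List.splitOnP_cons, modifyHead_fun_id]
      · have hpre : List.isPrefixOf ['.'] (c :: rest) = false := by
          simp [List.isPrefixOf]; intro hcc; exact (hc hcc.symm).elim
        simp only [PySem.Chars.splitOn.go, hpre, Bool.false_eq_true, if_neg, not_false_iff]
        rw [ih rest (c :: cur) acc (by simpa using Nat.lt_of_succ_lt_succ h)]
        have hne := List.splitOnP_ne_nil (fun x => x == '.') rest
        obtain ⟨hd, tl, hsp⟩ := List.exists_cons_of_ne_nil hne
        simp [List.splitOnP_cons, hc, hsp, List.modifyHead]

theorem splitOn_single (cs : List Char) :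
    PySem.Chars.splitOn cs ['.'] = List.splitOnP (· == '.') cs := by
  unfold PySem.Chars.splitOn
  rw [splitOn_go_single (cs.length + 1) cs [] [] (by omega)]
  simp [modifyHead_fun_id]

theorem splitOnP_last (pre suf : List Char) (hs : '.' ∉ suf) :
    List.splitOnP (· == '.') (pre ++ '.' :: suf)
      = List.splitOnP (· == '.') pre ++ [suf] := by
  induction pre with
  | nil =>
    rw [List.nil_append, List.splitOnP_cons,
      List.splitOnP_eq_single (· == '.') suf (by intro x hx hbe; exact hs ((beq_iff_eq.mp hbe) ▸ hx))]
    simp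
  | cons c pre ih =>
    by_cases hc : c = '.'
    · subst hc; simp [List.splitOnP_cons, ih]
    · have hne2 := List.splitOnP_ne_nil (fun x => x == '.') pre
      obtain ⟨hd2, tl2, hsp2⟩ := List.exists_cons_of_ne_nil hne2
      rw [List.cons_append, List.splitOnP_cons, List.splitOnP_cons, ih, hsp2]
      simp [hc, List.modifyHead]

theorem pyGet?_mem {α : Type} (xs : List α) (i : Int) (c : α)
    (h : PySem.List.pyGet? xs i = some c) : c ∈ xs := by
  simp only [PySem.List.pyGet?] at h
  cases hk : PySem.List.pyIdx? xs.length i with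
  | none => simp [hk] at h
  | some k => simp [hk] at h; exact List.mem_of_getElem? h

theorem loop_no_dot (cs : List Char) (hno : '.' ∉ cs) :
    ∀ (n : Nat) (sub : List Char), sub.length ≤ n → ∀ (r : Int), removeTldLoop cs sub r = none := by
  intro n
  induction n with
  | zero =>
    intro sub hlen r
    unfold removeTldLoop
    cases hg : PySem.List.pyGet? cs r with
    | none => rfl
    | some c =>
      have hc : c ≠ '.' := fun he => hno (he ▸ pyGet?_mem cs r c hg)
      simp only [hc, if_neg, not_false_iff]
      split
      · rfl
      · next pr hp =>
        have := PySem.List.length_of_pop?_eq_some sub hp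
        omega
  | succ m ih =>
    intro sub hlen r
    unfold removeTldLoop
    cases hg : PySem.List.pyGet? cs r with
    | none => rfl
    | some c =>
      have hc : c ≠ '.' := fun he => hno (he ▸ pyGet?_mem cs r c hg)
      simp only [hc, if_neg, not_false_iff]
      split
      · rfl
      · next pr hp =>
        have := PySem.List.length_of_pop?_eq_some sub hp
        exact ih pr.2 (by omega) (r - 1)

theorem loop_found (pre suf : List Char) (hs : '.' ∉ suf) :
    ∀ j, j ≤ suf.length →
      removeTldLoop (pre ++ '.' :: suf) (pre ++ '.' :: suf.take j) (↑pre.length + ↑j)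
        = some (pre ++ ['.']) := by
  intro j
  induction j with
  | zero =>
    intro _
    unfold removeTldLoop
    have hg : PySem.List.pyGet? (pre ++ '.' :: suf) (↑pre.length + ((0:Nat):Int)) = some '.' := by
      rw [show (↑pre.length + ((0:Nat):Int)) = ((pre.length : Nat) : Int) by push_cast; ring,
        PySem.List.pyGet?_natCast]
      simp
    rw [hg]
    simp
  | succ i ih =>
    intro hj
    have hi : i < suf.length := by omega
    unfold removeTldLoop
    have hg : PySem.List.pyGet? (pre ++ '.' :: suf) (↑pre.length + (↑(i+1):Int))
        = some (suf[i]) := by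
      rw [show (↑pre.length + (↑(i+1):Int)) = ((pre.length + (i+1) : Nat) : Int) by push_cast; ring,
        PySem.List.pyGet?_natCast]
      rw [List.getElem?_append_right (by omega)]
      simp [show pre.length + (i + 1) - pre.length = i + 1 by omega, hi]
    have hc : suf[i] ≠ '.' := fun he => hs (by rw [← he]; exact List.getElem_mem hi)
    have htake : pre ++ '.' :: suf.take (i+1) = (pre ++ '.' :: suf.take i) ++ [suf[i]] := by
      rw [List.take_add_one]
      simp [hi]
    have hpop : PySem.List.pop? (pre ++ '.' :: suf.take (i+1))
        = some (suf[i], pre ++ '.' :: suf.take i) := by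
      rw [htake]; exact PySem.List.pop?_last _ _
    rw [hg]
    simp only [hc, if_neg, not_false_iff]
    split
    · next hp => rw [hpop] at hp; cases hp
    · next pr hp =>
      rw [hpop] at hp
      cases hp
      have hr : (↑pre.length + (↑(i+1):Int)) - 1 = ↑pre.length + (↑i:Int) := by push_cast; ring
      rw [hr]
      exact ih (by omega)

theorem exists_last_dot (cs : List Char) (h : '.' ∈ cs) :
    ∃ pre suf, cs = pre ++ '.' :: suf ∧ '.' ∉ suf := by
  induction cs with
  | nil => cases h
  | cons c t ih =>
    by_cases ht : '.' ∈ t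
    · obtain ⟨pre, suf, heq, hns⟩ := ih ht
      exact ⟨c :: pre, suf, by simp [heq], hns⟩
    · have hc : c = '.' := by
        cases List.mem_cons.mp h with
        | inl h1 => exact h1.symm
        | inr h2 => exact (ht h2).elim
      exact ⟨[], t, by simp [hc], ht⟩

-- ===== VERDICT (by name: the statement is the Claim_ definition above) =====
theorem remove_tld_spec : Claim_equal_remove_tld := by
  intro d _
  unfold Spec_remove_tld remove_tld remove_tld_alt
  have hisin : PySem.Str.isIn "." d = PySem.Chars.isIn ['.'] d.toList := by
    simp [PySem.Str.isIn]
  by_cases h : '.' ∈ d.toList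
  · -- dotted: both return everything before the last dot
    obtain ⟨pre, suf, heq, hns⟩ := exists_last_dot d.toList h
    have htrue : PySem.Chars.isIn ['.'] d.toList = true := by
      rw [PySem.Chars.isIn_iff_infix, List.singleton_infix_iff]; exact h
    have hloop : removeTldLoop d.toList d.toList (PySem.Str.len d - 1) = some (pre ++ ['.']) := by
      have hr : PySem.Str.len d - 1 = ↑pre.length + (↑suf.length : Int) := by
        rw [PySem.Str.len_eq, heq]; simp; ring
      rw [hr, heq]
      have := loop_found pre suf hns suf.length le_rfl
      rwa [List.take_length] at this
    have hpop : PySem.List.pop? (pre ++ ['.']) = some ('.', pre) := PySem.List.pop?_last _ _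
    rw [hloop, hisin, htrue]
    simp only [hpop, Bool.true_eq_false, if_neg, not_false_iff]
    -- B's side: split at the last dot, drop the tail segment, rejoin
    rw [splitOn_single, heq, splitOnP_last pre suf hns, PySem.List.slice_to_neg_one,
      List.dropLast_concat]
    have hj : PySem.Chars.join ['.'] (List.splitOnP (fun x => x == '.') pre) = pre := by
      have := List.intercalate_splitOn pre '.'
      simpa [PySem.Chars.join, List.splitOn] using this
    rw [hj]
  · -- no dot: A's loop pops everything and raises IndexError; both strip
    have hfalse : PySem.Chars.isIn ['.'] d.toList = false := by
      rw [PySem.Chars.isIn_eq_false_iff, List.singleton_infix_iff]; exact h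
    rw [loop_no_dot d.toList h d.toList.length d.toList le_rfl (PySem.Str.len d - 1),
      hisin, hfalse]
    simp
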